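-- pv_equiv track=rewrite | github.com/adiabatic/abbots-morton-spaceport | tools/gen_ensure_sanity.py | table_wrap
-- ===== SOURCE A (Python) =====
-- COLS = 3
--
-- def empty_pair() -> str:
--     return "            <td></td>\n            <td></td>"
--
-- def table_wrap(cells: list[str]) -> str:
--     nrows = -(-len(cells) // COLS)  # ceil division
--     rows = []
--     for r in range(nrows):
--         chunk = []
--         for c in range(COLS):
--             idx = c * nrows + r
--             chunk.append(cells[idx] if idx < len(cells) else empty_pair())
--         rows.append("          <tr>\n" + "\n".join(chunk) + "\n          </tr>")
--     inner = "\n".join(rows)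
--     return (
--         "      <table>\n"
--         f"{inner}\n"
--         "      </table>"
--     )
-- ===== SOURCE B (Python) =====
-- COLS = 3
--
-- def empty_pair() -> str:
--     return "            <td></td>\n            <td></td>"
--
-- def table_wrap(cells: list[str]) -> str:
--     # column-major layout: build the COLS padded column slices, then transpose with zip
--     nrows = -(-len(cells) // COLS)
--     fill = empty_pair()
--     c0, c1, c2 = ((cells[c * nrows:(c + 1) * nrows] + [fill] * nrows)[:nrows]
--                   for c in range(COLS))
--     rows = ["          <tr>\n" + a + "\n" + b + "\n" + c + "\n          </tr>"
--             for a, b, c in zip(c0, c1, c2)]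
--     return "      <table>\n" + "\n".join(rows) + "\n      </table>"
-- ===== Notes on version B (the rewrite author's own statement) =====
-- stated objective: idiomatic
-- what changed: B builds the three column slices (padded to nrows with the fill cell) and transposes them with zip to form the rows, instead of A's per-cell index arithmetic idx = c*nrows+r with a bounds test inside nested loops.
import Mathlib
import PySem

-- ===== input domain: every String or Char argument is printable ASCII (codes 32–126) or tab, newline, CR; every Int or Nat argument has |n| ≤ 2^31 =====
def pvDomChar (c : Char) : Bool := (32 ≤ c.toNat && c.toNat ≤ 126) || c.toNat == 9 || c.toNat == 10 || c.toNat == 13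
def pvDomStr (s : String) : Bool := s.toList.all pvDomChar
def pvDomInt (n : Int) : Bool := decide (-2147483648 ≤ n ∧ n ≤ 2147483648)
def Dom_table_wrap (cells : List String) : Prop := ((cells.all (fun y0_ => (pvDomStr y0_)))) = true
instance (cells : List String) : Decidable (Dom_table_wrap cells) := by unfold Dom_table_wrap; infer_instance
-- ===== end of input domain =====

-- B replaces A's per-cell index arithmetic by slicing out the three padded columns and
-- transposing them with zip (an alternative, more idiomatic decomposition; same cost).

-- ===== PORT A =====
def empty_pair : String := "            <td></td>\n            <td></td>"

def table_wrap (cells : List String) : String :=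
  let nrows : Int := -(PySem.Int.floordiv (-(cells.length : Int)) 3)
  let rows : List String := (PySem.List.pyRange 0 nrows 1).foldl (fun rows r =>
    let chunk : List String := (PySem.List.pyRange 0 3 1).foldl (fun chunk c =>
      let idx := c * nrows + r
      chunk ++ [if idx < (cells.length : Int) then PySem.List.pyGetD cells idx "" else empty_pair]) []
    rows ++ ["          <tr>\n" ++ PySem.Str.join "\n" chunk ++ "\n          </tr>"]) []
  "      <table>\n" ++ PySem.Str.join "\n" rows ++ "\n      </table>"

-- ===== PORT B =====
def table_wrap_alt (cells : List String) : String :=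
  let nrows : Int := -(PySem.Int.floordiv (-(cells.length : Int)) 3)
  let fill := empty_pair
  let col : Int → List String := fun c =>
    PySem.List.slice (PySem.List.slice cells (some (c * nrows)) (some ((c + 1) * nrows))
      ++ PySem.List.pyRepeat [fill] nrows) none (some nrows)
  let rows : List String := (List.zip (col 0) (List.zip (col 1) (col 2))).map
    (fun t => "          <tr>\n" ++ t.1 ++ "\n" ++ t.2.1 ++ "\n" ++ t.2.2 ++ "\n          </tr>")
  "      <table>\n" ++ PySem.Str.join "\n" rows ++ "\n      </table>"

-- ===== PRECONDITION & SPEC =====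
def Spec_table_wrap (cells : List String) (out : String) : Prop := out = table_wrap_alt cells
instance (cells : List String) (out : String) : Decidable (Spec_table_wrap cells out) := by unfold Spec_table_wrap; infer_instance

-- ===== CLAIM (what is proved, stated in full; the proofs are below) =====
def Claim_equal_table_wrap : Prop := ∀ (cells : List String), Dom_table_wrap cells → Spec_table_wrap cells (table_wrap cells)

-- ===== LEMMAS AND PROOFS =====

-- the common value of cell (c, r), stated over Nat, and the common row string
def pvCell (cells : List String) (N c r : Nat) : String :=
  if h : c * N + r < cells.length then cells[c * N + r] else empty_pair

def pvRow (cells : List String) (N r : Nat) : String :=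
  "          <tr>\n" ++ pvCell cells N 0 r ++ "\n" ++ pvCell cells N 1 r ++ "\n"
    ++ pvCell cells N 2 r ++ "\n          </tr>"

lemma pv_nrows_eq (n : Nat) :
    -(PySem.Int.floordiv (-(n : Int)) 3) = (((n + 2) / 3 : Nat) : Int) := by
  rw [PySem.Int.neg_floordiv_neg_eq_iff_of_pos (by norm_num)]
  constructor <;> push_cast <;> omega

lemma pv_join3 (a b c : String) :
    PySem.Str.join "\n" [a, b, c] = a ++ "\n" ++ b ++ "\n" ++ c := by
  apply String.toList_inj.mp
  simp [PySem.Str.toList_join, PySem.Chars.join, List.intercalate]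

lemma pv_range03 : PySem.List.pyRange 0 3 1 = [0, 1, 2] := by decide

lemma pv_cellA (cells : List String) (N c k : Nat) (i : Int)
    (hi : i = ((c * N + k : Nat) : Int)) :
    (if i < (cells.length : Int) then PySem.List.pyGetD cells i "" else empty_pair)
      = pvCell cells N c k := by
  subst hi
  by_cases h : c * N + k < cells.length
  · rw [if_pos (by exact_mod_cast h), pvCell, dif_pos h,
      PySem.List.pyGetD_eq_getElem cells "" (by positivity) (by exact_mod_cast h)]
    congr 1
  · rw [if_neg (by exact_mod_cast h), pvCell, dif_neg h]

lemma pvA (cells : List String) :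
    table_wrap cells =
      "      <table>\n"
        ++ PySem.Str.join "\n"
            ((List.range ((cells.length + 2) / 3)).map (pvRow cells ((cells.length + 2) / 3)))
        ++ "\n      </table>" := by
  simp only [table_wrap]
  rw [pv_nrows_eq, pv_range03, PySem.List.pyRange_zero_natCast]
  simp only [List.foldl]
  rw [PySem.List.foldl_append_singleton_eq_map, List.map_map, List.nil_append]
  congr 2
  congr 1
  apply List.map_congr_left
  intro k hk
  simp only [List.mem_range] at hk
  simp only [Function.comp_apply, List.nil_append, List.cons_append, pv_join3, pvRow]
  rw [pv_cellA cells ((cells.length + 2) / 3) 0 k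
        (0 * (((cells.length + 2) / 3 : Nat) : Int) + (k : Int)) (by push_cast; ring),
      pv_cellA cells ((cells.length + 2) / 3) 1 k
        (1 * (((cells.length + 2) / 3 : Nat) : Int) + (k : Int)) (by push_cast; ring),
      pv_cellA cells ((cells.length + 2) / 3) 2 k
        (2 * (((cells.length + 2) / 3 : Nat) : Int) + (k : Int)) (by push_cast; ring)]
  simp [String.append_assoc]

-- B's padded column c, over Nat
def pvColN (cells : List String) (N c : Nat) : List String :=
  ((cells.drop (c * N)).take N ++ List.replicate N empty_pair).take N

lemma pv_col_eq (cells : List String) (N c : Nat) (ci : Int) (hc : ci = (c : Int)) :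
    PySem.List.slice
        (PySem.List.slice cells (some (ci * (N : Int))) (some ((ci + 1) * (N : Int)))
          ++ PySem.List.pyRepeat [empty_pair] (N : Int)) none (some (N : Int))
      = pvColN cells N c := by
  subst hc
  have h1 : ((c : Int) * (N : Int)) = ((c * N : Nat) : Int) := by push_cast; ring
  have h2 : (((c : Int) + 1) * (N : Int)) = ((c * N + N : Nat) : Int) := by push_cast; ring
  rw [h1, h2, PySem.List.slice_natCast, PySem.List.pyRepeat_singleton,
    PySem.List.slice_to_natCast, pvColN]
  simp

lemma pv_colN_length (cells : List String) (N c : Nat) : (pvColN cells N c).length = N := by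
  simp [pvColN]

lemma pv_colN_getElem (cells : List String) (N c r : Nat)
    (h : r < (pvColN cells N c).length) :
    (pvColN cells N c)[r] = pvCell cells N c r := by
  have hr : r < N := by have := pv_colN_length cells N c; omega
  unfold pvColN at *
  generalize hm : c * N = m at *
  rw [List.getElem_take, List.getElem_append]
  unfold pvCell
  rw [hm]
  by_cases h2 : r < ((cells.drop m).take N).length
  · rw [dif_pos h2, List.getElem_take, List.getElem_drop,
      dif_pos (by simp at h2; omega)]
  · rw [dif_neg h2, List.getElem_replicate, dif_neg (by simp at h2; omega)]

lemma pvB (cells : List String) :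
    table_wrap_alt cells =
      "      <table>\n"
        ++ PySem.Str.join "\n"
            ((List.range ((cells.length + 2) / 3)).map (pvRow cells ((cells.length + 2) / 3)))
        ++ "\n      </table>" := by
  simp only [table_wrap_alt]
  rw [pv_nrows_eq]
  rw [pv_col_eq cells _ 0 0 (by norm_num), pv_col_eq cells _ 1 1 (by norm_num),
      pv_col_eq cells _ 2 2 (by norm_num)]
  have hzip : List.zip (pvColN cells ((cells.length + 2) / 3) 0)
      (List.zip (pvColN cells ((cells.length + 2) / 3) 1) (pvColN cells ((cells.length + 2) / 3) 2))
      = (List.range ((cells.length + 2) / 3)).map (fun r =>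
          (pvCell cells ((cells.length + 2) / 3) 0 r,
            (pvCell cells ((cells.length + 2) / 3) 1 r, pvCell cells ((cells.length + 2) / 3) 2 r))) := by
    apply List.ext_getElem
    · simp [pv_colN_length]
    · intro i h1 h2
      simp only [List.getElem_zip, List.getElem_map, List.getElem_range]
      rw [pv_colN_getElem, pv_colN_getElem, pv_colN_getElem]
  rw [hzip, List.map_map]
  rfl

-- ===== VERDICT (by name: the statement is the Claim_ definition above) =====
theorem table_wrap_spec : Claim_equal_table_wrap := by
  intro cells _
  unfold Spec_table_wrap
  rw [pvA, pvB]
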